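-- pv_equiv track=rewrite | github.com/samuelfneumann/CMPUT503 | Code/color_detector/test.py | print_hist
-- ===== SOURCE A (Python) =====
-- MAX = 5
--
-- def format_title(title):
--     if title == "Red":
--         return "\x1b[1;31m"
--     elif title == "Green":
--         return "\x1b[1;32m"
--     elif title == "Blue":
--         return "\x1b[1;34m"
--     else:
--         return ""
--
-- def print_hist(hist, title=""):
--     height, bins = hist
--     lines = []
--
--     # Create the title
--     length = (len(height) + 1) * 2
--     spaces = (length - len(title)) // 2
--     rem = length - (spaces * 2 + len(title))
--     lines.append(format_title(title) + " " * spaces + title + " " * spaces +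
--                  " " * rem + "\x1b[1;0m")
--
--     lines.append("⎢" + " " * (length - 2))
--
--     for i in range(MAX, 0, -1):
--         line = "⎢"
--
--         for j in range(len(height)):
--             if height[j] < i:
--                 line += "  "
--             else:
--                 line += "█ "
--         lines.append(line)
--
--     lines.append("__" * (len(bins) - 1) + "_")
--     return lines
-- ===== SOURCE B (Python) =====
-- MAX = 5
--
-- def format_title(title):
--     if title == "Red":
--         return "\x1b[1;31m"
--     elif title == "Green":
--         return "\x1b[1;32m"
--     elif title == "Blue":
--         return "\x1b[1;34m"
--     else:
--         return ""
--
-- def print_hist(hist, title=""):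
--     # Column-major construction: build each bin's column of cells as two
--     # replicated runs (no per-cell comparison), then transpose with zip.
--     height, bins = hist
--     length = (len(height) + 1) * 2
--     spaces = (length - len(title)) // 2
--     rem = length - (spaces * 2 + len(title))
--     header = (format_title(title) + " " * spaces + title + " " * spaces +
--               " " * rem + "\x1b[1;0m")
--     cols = [["⎢"] * MAX]
--     for h in height:
--         c = max(0, min(MAX, h))
--         cols.append(["  "] * (MAX - c) + ["█ "] * c)
--     rows = ["".join(r) for r in zip(*cols)]
--     footer = "__" * (len(bins) - 1) + "_"
--     return [header, "⎢" + " " * (length - 2)] + rows + [footer]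
-- ===== Notes on version B (the rewrite author's own statement) =====
-- stated objective: alternative
-- what changed: B builds the chart column-major: for each bin it materialises a column as two replicated runs of blank/full cells (replication from a clamped bar height, no per-cell comparison), prepends a constant '⎢' column, and obtains the rows by transposing with zip, whereas A generates rows top-down, re-comparing height[j] < i at every cell inside nested loops.
import Mathlib
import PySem

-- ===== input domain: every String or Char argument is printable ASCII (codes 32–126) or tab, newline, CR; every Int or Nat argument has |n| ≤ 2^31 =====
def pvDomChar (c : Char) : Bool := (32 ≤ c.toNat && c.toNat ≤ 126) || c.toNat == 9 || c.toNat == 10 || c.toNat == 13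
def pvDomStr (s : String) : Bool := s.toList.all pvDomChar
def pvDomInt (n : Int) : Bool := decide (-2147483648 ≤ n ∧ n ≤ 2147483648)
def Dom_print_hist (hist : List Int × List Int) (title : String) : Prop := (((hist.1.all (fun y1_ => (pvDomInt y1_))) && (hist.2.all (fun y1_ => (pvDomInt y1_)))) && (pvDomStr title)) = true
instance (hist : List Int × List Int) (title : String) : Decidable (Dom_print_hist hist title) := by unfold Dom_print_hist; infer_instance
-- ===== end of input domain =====

-- B builds the chart column-major (each bin's column is two replicated runs from a
-- clamped bar height) and transposes with zip, instead of A's row-major nested loops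
-- re-comparing height[j] < i at every cell; alternative decomposition, not claimed faster.

-- Python's s * n for a string s and int n (empty for n ≤ 0); used by both ports (exact).
def strRepeat (s : String) (n : Int) : String :=
  String.ofList (List.flatten (List.replicate n.toNat s.toList))

-- format_title, shared helper of both Python versions
def formatTitle (title : String) : String :=
  if title = "Red" then "\x1b[1;31m"
  else if title = "Green" then "\x1b[1;32m"
  else if title = "Blue" then "\x1b[1;34m"
  else ""

-- ===== PORT A =====
def print_hist (hist : List Int × List Int) (title : String) : List String :=
  let height := hist.1
  let bins := hist.2
  let length : Int := ((height.length : Int) + 1) * 2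
  let spaces : Int := PySem.Int.floordiv (length - PySem.Str.len title) 2
  let rem : Int := length - (spaces * 2 + PySem.Str.len title)
  let lines : List String := [formatTitle title ++ strRepeat " " spaces ++ title ++
      strRepeat " " spaces ++ strRepeat " " rem ++ "\x1b[1;0m"]
  let lines := lines ++ ["⎢" ++ strRepeat " " (length - 2)]
  let lines := (PySem.List.pyRange 5 0 (-1)).foldl (fun lines i =>
      lines ++ [(PySem.List.pyRange 0 (height.length : Int) 1).foldl
        (fun line j => line ++ (if PySem.List.pyGetD height j 0 < i then "  " else "█ ")) "⎢"]) lines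
  lines ++ [strRepeat "__" ((bins.length : Int) - 1) ++ "_"]

-- ===== PORT B =====
-- one bin's column: (MAX - c) blank cells on top of c full cells, c the clamped height
def barColumn (h : Int) : List String :=
  let c : Int := max 0 (min 5 h)
  List.replicate (5 - c).toNat "  " ++ List.replicate c.toNat "█ "

-- Python zip(*(x :: rest)) on lists: stop as soon as any list is exhausted (exact)
def zipStarAux : List String → List (List String) → List (List String)
  | [], _ => []
  | h :: t, rest =>
      if rest.any (·.isEmpty) then []
      else (h :: rest.map (·.headD "")) :: zipStarAux t (rest.map (·.drop 1))

def pyZipStar : List (List String) → List (List String)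
  | [] => []
  | x :: xs => zipStarAux x xs

def print_hist_alt (hist : List Int × List Int) (title : String) : List String :=
  let height := hist.1
  let bins := hist.2
  let length : Int := ((height.length : Int) + 1) * 2
  let spaces : Int := PySem.Int.floordiv (length - PySem.Str.len title) 2
  let rem : Int := length - (spaces * 2 + PySem.Str.len title)
  let header := formatTitle title ++ strRepeat " " spaces ++ title ++
      strRepeat " " spaces ++ strRepeat " " rem ++ "\x1b[1;0m"
  let cols : List (List String) := List.replicate 5 "⎢" :: height.map barColumn
  let rows := (pyZipStar cols).map (fun r => PySem.Str.join "" r)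
  let footer := strRepeat "__" ((bins.length : Int) - 1) ++ "_"
  [header, "⎢" ++ strRepeat " " (length - 2)] ++ rows ++ [footer]

-- ===== PRECONDITION & SPEC =====
def Spec_print_hist (hist : List Int × List Int) (title : String) (out : List String) : Prop := out = print_hist_alt hist title
instance (hist : List Int × List Int) (title : String) (out : List String) : Decidable (Spec_print_hist hist title out) := by unfold Spec_print_hist; infer_instance

-- ===== CLAIM (what is proved, stated in full; the proofs are below) =====
def Claim_equal_print_hist : Prop := ∀ (hist : List Int × List Int) (title : String), Dom_print_hist hist title → Spec_print_hist hist title (print_hist hist title)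

-- ===== LEMMAS AND PROOFS =====

theorem flatten_intersperse_nil {α : Type} (l : List (List α)) :
    (List.intersperse [] l).flatten = l.flatten := by
  induction l with
  | nil => rfl
  | cons x xs ih =>
    cases xs with
    | nil => simp
    | cons y ys =>
      rw [show List.intersperse ([] : List α) (x :: y :: ys)
            = x :: [] :: List.intersperse [] (y :: ys) from rfl]
      simp only [List.flatten_cons, ih, List.nil_append]

theorem strJoin_nil_cons (x : String) (xs : List String) :
    PySem.Str.join "" (x :: xs) = x ++ PySem.Str.join "" xs := by
  apply String.toList_inj.mp
  simp [PySem.Str.join, PySem.Chars.join, List.intercalate, flatten_intersperse_nil]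

theorem foldl_str_append {α : Type} (l : List α) (f : α → String) (a : String) :
    l.foldl (fun acc x => acc ++ f x) a = a ++ PySem.Str.join "" (l.map f) := by
  induction l generalizing a with
  | nil =>
      apply String.toList_inj.mp
      simp [PySem.Str.join, PySem.Chars.join, List.intercalate]
  | cons x xs ih =>
      simp only [List.foldl_cons, List.map_cons, ih, strJoin_nil_cons]
      apply String.toList_inj.mp
      simp

-- A's row for level i, as a join over height
theorem row_A_eq (height : List Int) (i : Int) :
    (PySem.List.pyRange 0 (height.length : Int) 1).foldl
        (fun line j => line ++ (if PySem.List.pyGetD height j 0 < i then "  " else "█ ")) "⎢"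
      = "⎢" ++ PySem.Str.join "" (height.map (fun h => if h < i then "  " else "█ ")) := by
  rw [PySem.List.foldl_pyRange_zero_pyGetD' height 0
      (fun line h => line ++ (if h < i then "  " else "█ ")) "⎢",
    foldl_str_append]

-- transpose characterization when every column has the same length as the first
theorem zipStarAux_eq (x : List String) (rest : List (List String))
    (hlen : ∀ c ∈ rest, c.length = x.length) :
    zipStarAux x rest
      = (List.range x.length).map (fun k => x.getD k "" :: rest.map (fun c => c.getD k "")) := by
  induction x generalizing rest with
  | nil => simp [zipStarAux]
  | cons h t ih =>
      have hne : ∀ c ∈ rest, c ≠ [] := by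
        intro c hc hcnil
        have := hlen c hc
        simp [hcnil] at this
      have hany : rest.any (·.isEmpty) = false := by
        simp only [List.any_eq_false]
        intro c hc
        simp [List.isEmpty_iff, hne c hc]
      rw [zipStarAux, if_neg (by simp [hany])]
      rw [List.length_cons, List.range_succ_eq_map]
      simp only [List.map_cons, List.map_map]
      congr 1
      · congr 1
        apply List.map_congr_left
        intro c hc
        cases c with
        | nil => exact absurd rfl (hne _ hc)
        | cons a b => rfl
      · rw [ih (rest.map (·.drop 1)) ?_]
        · apply List.map_congr_left
          intro k _
          simp only [Function.comp]
          congr 1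
          rw [List.map_map]
          apply List.map_congr_left
          intro c hc
          cases c with
          | nil => exact absurd rfl (hne _ hc)
          | cons a b => rfl
        · intro c hc
          rcases List.mem_map.mp hc with ⟨c', hc', rfl⟩
          have := hlen c' hc'
          simp at this ⊢
          omega

theorem barColumn_length (h : Int) : (barColumn h).length = 5 := by
  unfold barColumn
  simp only [List.length_append, List.length_replicate]
  omega

-- getD of a blank-run/full-run column
theorem repGetD (c : Int) (k : ℕ) (hk : k < 5) (h0 : 0 ≤ c) (h5 : c ≤ 5) :
    (List.replicate (5 - c).toNat "  " ++ List.replicate c.toNat "█ ").getD k ""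
      = if (k : Int) < 5 - c then "  " else "█ " := by
  rw [List.getD_eq_getElem?_getD]
  by_cases hka : (k : Int) < 5 - c
  · rw [List.getElem?_append_left (by simp only [List.length_replicate]; omega)]
    rw [List.getElem?_replicate, if_pos (by omega), if_pos hka]
    rfl
  · rw [List.getElem?_append_right (by simp only [List.length_replicate]; omega)]
    rw [List.getElem?_replicate, if_pos (by simp only [List.length_replicate]; omega), if_neg hka]
    rfl

-- the cell of a column at depth k (k < 5) is exactly A's comparison against level 5 - k
theorem barColumn_getD (h : Int) (k : ℕ) (hk : k < 5) :
    (barColumn h).getD k "" = if h < 5 - (k : Int) then "  " else "█ " := by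
  rw [show barColumn h = List.replicate (5 - max 0 (min 5 h)).toNat "  "
        ++ List.replicate (max 0 (min 5 h)).toNat "█ " from rfl]
  rw [repGetD _ k hk (le_max_left 0 _) (max_le (by norm_num) (min_le_left 5 h))]
  have hiff : ((k : Int) < 5 - max 0 (min 5 h)) ↔ (h < 5 - (k : Int)) := by omega
  rw [if_congr hiff rfl rfl]

-- ===== VERDICT (by name: the statement is the Claim_ definition above) =====
theorem print_hist_spec : Claim_equal_print_hist := by
  intro hist title _
  unfold Spec_print_hist print_hist print_hist_alt
  simp only [PySem.List.foldl_append_singleton_eq_map]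
  congr 1
  congr 1
  -- rows
  rw [pyZipStar, zipStarAux_eq _ _ (by
        intro c hc
        rcases List.mem_map.mp hc with ⟨h, _, rfl⟩
        simp [barColumn_length])]
  simp only [List.length_replicate]
  have hrange : PySem.List.pyRange 5 0 (-1) = (List.range 5).map (fun k : ℕ => ((5 : Int) - (k : Int))) := by
    decide
  rw [hrange, List.map_map, List.map_map]
  apply List.map_congr_left
  intro k hk
  have hk5 : k < 5 := List.mem_range.mp hk
  simp only [Function.comp]
  rw [row_A_eq, strJoin_nil_cons]
  congr 1
  · interval_cases k <;> rfl
  · congr 1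
    rw [List.map_map]
    apply List.map_congr_left
    intro h _
    simp only [Function.comp]
    exact (barColumn_getD h k hk5).symm
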